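-- pv_equiv track=rewrite | github.com/JKHira/sdsl2_coder | references/legacy_tools/gate_c.py | _is_comment_only_block_line
-- ===== SOURCE A (Python) =====
-- def _find_outside_strings(
--     line: str, token: str, start: int = 0, stop_at_line_comment: bool = True
-- ) -> int:
--     in_string: str | None = None
--     escaped = False
--     i = start
--     while i < len(line):
--         ch = line[i]
--         if in_string is not None:
--             if escaped:
--                 escaped = False
--             elif ch == "\\":
--                 escaped = True
--             elif ch == in_string:
--                 in_string = None
--             i += 1
--             continue
--         if stop_at_line_comment and ch == "/" and i + 1 < len(line) and line[i + 1] == "/":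
--             break
--         if ch in ('"', "'"):
--             in_string = ch
--             i += 1
--             continue
--         if line.startswith(token, i):
--             return i
--         i += 1
--     return -1
--
-- def _block_comment_start_index(line: str) -> int:
--     return _find_outside_strings(line, "/*", stop_at_line_comment=True)
--
-- def _block_comment_end_index(
--     line: str, start: int = 0, stop_at_line_comment: bool = True
-- ) -> int:
--     return _find_outside_strings(line, "*/", start=start, stop_at_line_comment=stop_at_line_comment)
--
-- def _is_comment_only_block_line(line: str) -> bool:
--     start = _block_comment_start_index(line)
--     if start == -1:
--         return False
--     if any(not ch.isspace() for ch in line[:start]):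
--         return False
--     end = _block_comment_end_index(line, start + 2, stop_at_line_comment=False)
--     if end == -1:
--         return True
--     return all(ch.isspace() for ch in line[end + 2 :])
-- ===== SOURCE B (Python) =====
-- def _is_comment_only_block_line(line: str) -> bool:
--     # Single-pass state machine: skip leading whitespace, require "/*" as the
--     # first non-whitespace text, then scan for "*/" outside strings.
--     n = len(line)
--     i = 0
--     while i < n and line[i].isspace():
--         i += 1
--     if not line.startswith("/*", i):
--         return False
--     i += 2
--     in_string = None
--     escaped = False
--     while i < n:
--         ch = line[i]
--         if in_string is not None:
--             if escaped:
--                 escaped = False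
--             elif ch == "\\":
--                 escaped = True
--             elif ch == in_string:
--                 in_string = None
--         elif ch in ('"', "'"):
--             in_string = ch
--         elif ch == "*" and i + 1 < n and line[i + 1] == "/":
--             return all(c.isspace() for c in line[i + 2:])
--         i += 1
--     return True
-- ===== Notes on version B (the rewrite author's own statement) =====
-- stated objective: simpler
-- what changed: Replaces the two generic _find_outside_strings helper calls plus separate prefix/suffix whitespace scans with one inlined two-phase state machine that skips leading whitespace directly (no string/escape tracking before the comment, since any quote is itself non-whitespace) and then scans once for */ outside strings.
import Mathlib
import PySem

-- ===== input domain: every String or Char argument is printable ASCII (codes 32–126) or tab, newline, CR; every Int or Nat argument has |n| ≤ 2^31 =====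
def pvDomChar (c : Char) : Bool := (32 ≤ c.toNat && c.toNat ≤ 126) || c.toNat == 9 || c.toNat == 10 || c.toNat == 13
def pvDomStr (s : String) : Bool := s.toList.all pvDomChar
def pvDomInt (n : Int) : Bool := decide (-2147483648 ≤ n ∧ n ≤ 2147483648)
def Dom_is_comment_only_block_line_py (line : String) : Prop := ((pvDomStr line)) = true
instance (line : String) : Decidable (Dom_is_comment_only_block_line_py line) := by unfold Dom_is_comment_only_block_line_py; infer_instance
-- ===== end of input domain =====

-- B replaces the two generic `_find_outside_strings` helper calls (plus separate
-- prefix/suffix whitespace passes) by one inlined state machine: skip leading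
-- whitespace, require "/*" immediately, then scan once for "*/" outside strings
-- (objective: simpler decomposition; same O(n), with an early exit when the first
-- non-whitespace text is not "/*", where A still scans the whole line).

-- ===== PORT A =====

-- Python's ch.isspace() restricted to ASCII (exact on the Dom_ alphabet and on all ASCII)
def pyIsSpace (c : Char) : Bool :=
  c = ' ' || c = '\t' || c = '\n' || c = '\r' || c = '\x0b' || c = '\x0c'

-- the `while i < len(line)` loop of _find_outside_strings, as structural recursion
-- over the remaining suffix of the line, carrying the absolute index i
def fosGo (tok : List Char) (stopLC : Bool) (inStr : Option Char) (esc : Bool)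
    (i : Nat) : List Char → Int
  | [] => -1
  | ch :: rest =>
    match inStr with
    | some q =>
      if esc then fosGo tok stopLC (some q) false (i+1) rest
      else if ch = '\\' then fosGo tok stopLC (some q) true (i+1) rest
      else if ch = q then fosGo tok stopLC none false (i+1) rest
      else fosGo tok stopLC (some q) false (i+1) rest
    | none =>
      if stopLC = true ∧ ch = '/' ∧ rest.head? = some '/' then -1
      else if ch = '"' ∨ ch = '\'' then fosGo tok stopLC (some ch) false (i+1) rest
      else if tok.isPrefixOf (ch :: rest) then (i : Int)
      else fosGo tok stopLC none false (i+1) rest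

def findOutsideStrings (cs : List Char) (tok : List Char) (start : Nat) (stopLC : Bool) : Int :=
  fosGo tok stopLC none false start (cs.drop start)

def is_comment_only_block_line_py (line : String) : Bool :=
  let cs := line.toList
  let start := findOutsideStrings cs ['/', '*'] 0 true
  if start = -1 then false
  else if (cs.take start.toNat).any (fun c => !pyIsSpace c) then false
  else
    let e := findOutsideStrings cs ['*', '/'] (start.toNat + 2) false
    if e = -1 then true
    else (cs.drop (e.toNat + 2)).all pyIsSpace

-- ===== PORT B =====

-- the second `while` loop of B: scan for "*/" outside strings
def altPhase2 (inStr : Option Char) (esc : Bool) : List Char → Bool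
  | [] => true
  | ch :: rest =>
    match inStr with
    | some q =>
      if esc then altPhase2 (some q) false rest
      else if ch = '\\' then altPhase2 (some q) true rest
      else if ch = q then altPhase2 none false rest
      else altPhase2 (some q) false rest
    | none =>
      if ch = '"' ∨ ch = '\'' then altPhase2 (some ch) false rest
      else if ch = '*' ∧ rest.head? = some '/' then (rest.drop 1).all pyIsSpace
      else altPhase2 none false rest

def is_comment_only_block_line_py_alt (line : String) : Bool :=
  let sfx := line.toList.dropWhile pyIsSpace   -- the leading-whitespace skip loop
  if ['/', '*'].isPrefixOf sfx then altPhase2 none false (sfx.drop 2)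
  else false

-- ===== PRECONDITION & SPEC =====
def Spec_is_comment_only_block_line_py (line : String) (out : Bool) : Prop := out = is_comment_only_block_line_py_alt line
instance (line : String) (out : Bool) : Decidable (Spec_is_comment_only_block_line_py line out) := by unfold Spec_is_comment_only_block_line_py; infer_instance

-- ===== CLAIM (what is proved, stated in full; the proofs are below) =====
def Claim_equal_is_comment_only_block_line_py : Prop := ∀ (line : String), Dom_is_comment_only_block_line_py line → Spec_is_comment_only_block_line_py line (is_comment_only_block_line_py line)

-- ===== LEMMAS AND PROOFS =====

theorem drop_add (l : List Char) (i j : Nat) : l.drop (i + j) = (l.drop i).drop j := by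
  rw [List.drop_drop]

theorem take_tw (p : Char → Bool) : ∀ l : List Char, l.take (l.takeWhile p).length = l.takeWhile p
  | [] => rfl
  | c :: t => by by_cases h : p c <;> simp [h, take_tw p t]

theorem drop_tw (p : Char → Bool) : ∀ l : List Char, l.drop (l.takeWhile p).length = l.dropWhile p
  | [] => rfl
  | c :: t => by by_cases h : p c <;> simp [h, drop_tw p t]

theorem head_dw (p : Char → Bool) : ∀ (l : List Char) (c : Char) (t : List Char),
    l.dropWhile p = c :: t → p c = false
  | [], c, t, h => by simp at h
  | a :: l, c, t, h => by
    by_cases ha : p a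
    · exact head_dw p l c t (by simpa [ha] using h)
    · simp [ha] at h
      simp [← h.1, ha]

theorem prefix_two (a b ch : Char) (rest : List Char) :
    ([a, b].isPrefixOf (ch :: rest)) ↔ (ch = a ∧ rest.head? = some b) := by
  cases rest
  · simp [List.isPrefixOf]
  · simp [List.isPrefixOf]
    tauto

-- A's start-search steps unchanged over leading whitespace
theorem fosGo_ws_skip : ∀ (cs : List Char) (i : Nat),
    fosGo ['/', '*'] true none false i cs =
      fosGo ['/', '*'] true none false (i + (cs.takeWhile pyIsSpace).length)
        (cs.dropWhile pyIsSpace)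
  | [], i => by simp
  | c :: t, i => by
    by_cases h : pyIsSpace c
    · have hne : fosGo ['/', '*'] true none false i (c :: t) =
          fosGo ['/', '*'] true none false (i + 1) t := by
        have h' := h
        simp only [pyIsSpace, Bool.or_eq_true, decide_eq_true_eq] at h'
        rcases h' with ((((rfl | rfl) | rfl) | rfl) | rfl) | rfl <;>
          simp [fosGo, List.isPrefixOf]
      rw [hne, fosGo_ws_skip t (i + 1)]
      simp only [List.takeWhile_cons, h, List.dropWhile_cons, if_pos, List.length_cons]
      congr 1
      omega
    · simp [h]

-- A's start-search returns the current index when "/*" is right there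
theorem fosGo_hit : ∀ (sfx : List Char) (i : Nat),
    ['/', '*'].isPrefixOf sfx →
    fosGo ['/', '*'] true none false i sfx = (i : Int)
  | [], _, h => by simp [List.isPrefixOf] at h
  | [_], _, h => by simp [List.isPrefixOf] at h
  | a :: b :: t, i, h => by
    simp only [List.isPrefixOf, Bool.and_eq_true, beq_iff_eq] at h
    obtain ⟨rfl, rfl, -⟩ := h
    simp [fosGo, List.isPrefixOf]

-- characterisation of a non-negative fosGo result
theorem fosGo_result (tok : List Char) (stopLC : Bool) :
    ∀ (sfx : List Char) (inStr : Option Char) (esc : Bool) (i : Nat),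
      fosGo tok stopLC inStr esc i sfx = -1 ∨
      ∃ m, fosGo tok stopLC inStr esc i sfx = ((i + m : Nat) : Int) ∧ m < sfx.length ∧
        tok.isPrefixOf (sfx.drop m)
  | [], _, _, i => Or.inl rfl
  | ch :: rest, inStr, esc, i => by
    have lift : ∀ (a : Option Char) (b : Bool),
        fosGo tok stopLC a b (i + 1) rest = -1 ∨
        ∃ m, fosGo tok stopLC a b (i + 1) rest = ((i + m : Nat) : Int) ∧
          m < (ch :: rest).length ∧ tok.isPrefixOf ((ch :: rest).drop m) := by
      intro a b
      rcases fosGo_result tok stopLC rest a b (i + 1) with h | ⟨m, h1, h2, h3⟩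
      · exact Or.inl h
      · refine Or.inr ⟨m + 1, ?_, by simpa using Nat.succ_lt_succ h2, by simpa using h3⟩
        rw [h1]; congr 1; omega
    cases inStr with
    | some q =>
      simp only [fosGo]
      split_ifs <;> exact lift _ _
    | none =>
      simp only [fosGo]
      split_ifs with h1 h2 h3
      · exact Or.inl rfl
      · exact lift _ _
      · exact Or.inr ⟨0, by simp, Nat.succ_pos _, by simpa using h3⟩
      · exact lift _ _

-- the end-search + trailing-whitespace check of A equals B's phase-2 machine
theorem fosGo_phase2 (cs : List Char) :
    ∀ (sfx : List Char) (inStr : Option Char) (esc : Bool) (i : Nat),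
      sfx = cs.drop i →
      (if fosGo ['*', '/'] false inStr esc i sfx = -1 then true
       else (cs.drop ((fosGo ['*', '/'] false inStr esc i sfx).toNat + 2)).all pyIsSpace) =
      altPhase2 inStr esc sfx
  | [], inStr, esc, i, h => by simp [fosGo, altPhase2]
  | ch :: rest, inStr, esc, i, h => by
    have hrest : rest = cs.drop (i + 1) := by
      rw [drop_add, ← h, List.drop_one, List.tail_cons]
    have hstop : ¬ (false = true ∧ ch = '/' ∧ rest.head? = some '/') := by simp
    cases inStr with
    | some q =>
      cases esc with
      | false =>
        by_cases h1 : ch = '\\'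
        · simp only [fosGo, altPhase2, if_neg (Bool.false_ne_true), if_pos h1]
          exact fosGo_phase2 cs rest (some q) true (i + 1) hrest
        · by_cases h2 : ch = q
          · simp only [fosGo, altPhase2, if_neg (Bool.false_ne_true), if_neg h1, if_pos h2]
            exact fosGo_phase2 cs rest none false (i + 1) hrest
          · simp only [fosGo, altPhase2, if_neg (Bool.false_ne_true), if_neg h1, if_neg h2]
            exact fosGo_phase2 cs rest (some q) false (i + 1) hrest
      | true =>
        simp only [fosGo, altPhase2]
        exact fosGo_phase2 cs rest (some q) false (i + 1) hrest
    | none =>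
      by_cases hq : ch = '"' ∨ ch = '\''
      · simp only [fosGo, altPhase2, if_neg hstop, if_pos hq]
        exact fosGo_phase2 cs rest (some ch) false (i + 1) hrest
      · by_cases hstar : ch = '*' ∧ rest.head? = some '/'
        · have hpre : (['*', '/'].isPrefixOf (ch :: rest)) = true := by
            rw [prefix_two]; exact hstar
          have hdrop : cs.drop (i + 2) = rest.drop 1 := by
            rw [drop_add, ← h]
            rfl
          rw [show fosGo ['*', '/'] false none esc i (ch :: rest) = (i : Int) from by
            simp only [fosGo, if_neg hstop, if_neg hq, if_pos hpre]]
          rw [if_neg (by omega : ¬ ((i : Int) = -1))]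
          simp only [altPhase2, if_neg hq, if_pos hstar, Int.toNat_natCast, hdrop]
        · have hpre : ¬ ((['*', '/'].isPrefixOf (ch :: rest)) = true) := by
            rw [prefix_two]; exact hstar
          simp only [fosGo, altPhase2, if_neg hstop, if_neg hq, if_neg hpre, if_neg hstar]
          exact fosGo_phase2 cs rest none false (i + 1) hrest

-- ===== VERDICT (by name: the statement is the Claim_ definition above) =====
theorem is_comment_only_block_line_py_spec : Claim_equal_is_comment_only_block_line_py := by
  intro line _
  unfold Spec_is_comment_only_block_line_py
  unfold is_comment_only_block_line_py is_comment_only_block_line_py_alt findOutsideStrings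
  generalize line.toList = cs
  simp only [List.drop_zero]
  rw [fosGo_ws_skip cs 0]
  simp only [Nat.zero_add]
  set k := (cs.takeWhile pyIsSpace).length with hk
  set sfx := cs.dropWhile pyIsSpace with hsfx
  by_cases hp : (['/', '*'].isPrefixOf sfx) = true
  · rw [fosGo_hit sfx k hp]
    rw [if_neg (by omega : ¬ ((k : Int) = -1))]
    have hany : (cs.take (Int.toNat (k : Int))).any (fun c => !pyIsSpace c) = false := by
      rw [Int.toNat_natCast, hk, take_tw]
      simp only [List.any_eq_false]
      intro c hc
      simp [List.mem_takeWhile_imp hc]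
    rw [hany, if_neg (Bool.false_ne_true)]
    have hdrop2 : cs.drop (Int.toNat (k : Int) + 2) = sfx.drop 2 := by
      rw [Int.toNat_natCast, drop_add, hk, drop_tw, ← hsfx]
    rw [hdrop2]
    rw [fosGo_phase2 cs (sfx.drop 2) none false (Int.toNat (k : Int) + 2)
      (by rw [← hdrop2])]
    rw [if_pos hp]
  · rw [if_neg hp]
    rcases fosGo_result ['/', '*'] true sfx none false k with hres | ⟨m, h1, h2, h3⟩
    · rw [hres, if_pos rfl]
    · rw [h1, if_neg (by omega : ¬ (((k + m : Nat) : Int) = -1))]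
      have hm : 1 ≤ m := by
        rcases Nat.eq_zero_or_pos m with rfl | hpos
        · rw [List.drop_zero] at h3
          exact absurd h3 hp
        · exact hpos
      obtain ⟨c, t, hct⟩ := List.exists_cons_of_ne_nil
        (l := sfx) (by intro hnil; rw [hnil] at h2; simp at h2)
      have hcw : pyIsSpace c = false := head_dw pyIsSpace cs c t (hsfx ▸ hct)
      have hmem : c ∈ cs.take (Int.toNat ((k + m : Nat) : Int)) := by
        rw [Int.toNat_natCast]
        have hsplit : cs = cs.takeWhile pyIsSpace ++ sfx := by
          rw [hsfx]
          exact (List.takeWhile_append_dropWhile).symm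
        rw [show cs.take (k + m) = cs.takeWhile pyIsSpace ++ sfx.take m from by
          conv_lhs => rw [hsplit, hk]
          rw [List.take_length_add_append]]
        refine List.mem_append_right _ ?_
        obtain ⟨m', rfl⟩ : ∃ m', m = m' + 1 := ⟨m - 1, by omega⟩
        simp [hct]
      have hany : (cs.take (Int.toNat ((k + m : Nat) : Int))).any (fun c => !pyIsSpace c) = true := by
        rw [List.any_eq_true]
        exact ⟨c, hmem, by simp [hcw]⟩
      rw [hany, if_pos rfl]
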